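-- pv_equiv track=rewrite | github.com/tenstorrent/tt-metal | models/demos/clip_vit/tt/tt_clip_vision_optimized.py | _get_optimal_subblock
-- ===== SOURCE A (Python) =====
-- def _get_optimal_subblock(per_core_M, per_core_N, max_product=8):
--     """Find largest out_subblock_h × out_subblock_w that fits in register file."""
--     best_h, best_w = 1, 1
--     for h in range(1, per_core_M + 1):
--         if per_core_M % h != 0:
--             continue
--         for w in range(1, per_core_N + 1):
--             if per_core_N % w != 0:
--                 continue
--             if h * w > max_product:
--                 continue
--             if not (w == per_core_N or h == 1):
--                 continue
--             if h * w > best_h * best_w: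
--                 best_h, best_w = h, w
--     return best_h, best_w
-- ===== SOURCE B (Python) =====
-- def _get_optimal_subblock(per_core_M, per_core_N, max_product=8):
--     """Find largest out_subblock_h x out_subblock_w that fits in register file.
--
--     Two flat scans instead of a nested sweep: the only shapes the original
--     accepts are (1, w) with w a divisor of N, or (h, N) with h a divisor of M,
--     so pick the best of each family directly (first hit scanning from the top).
--     """
--     if per_core_M < 1 or per_core_N < 1:
--         return (1, 1)
--     w1 = next((w for w in range(per_core_N, 0, -1)
--                if per_core_N % w == 0 and w <= max_product), 0)
--     h2 = next((h for h in range(per_core_M, 1, -1)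
--                if per_core_M % h == 0 and h * per_core_N <= max_product), 0)
--     if h2 and h2 * per_core_N > w1:
--         return (h2, per_core_N)
--     if w1:
--         return (1, w1)
--     return (1, 1)
-- ===== Notes on version B (the rewrite author's own statement) =====
-- stated objective: faster
-- what changed: Replaced the nested O(M*N) sweep by two independent top-down scans: the accepted shapes are only (1,w) with w|N and (h,N) with h|M, so B finds the largest member of each family directly (first hit from the top) and compares the two, O(M+N).
import Mathlib
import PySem

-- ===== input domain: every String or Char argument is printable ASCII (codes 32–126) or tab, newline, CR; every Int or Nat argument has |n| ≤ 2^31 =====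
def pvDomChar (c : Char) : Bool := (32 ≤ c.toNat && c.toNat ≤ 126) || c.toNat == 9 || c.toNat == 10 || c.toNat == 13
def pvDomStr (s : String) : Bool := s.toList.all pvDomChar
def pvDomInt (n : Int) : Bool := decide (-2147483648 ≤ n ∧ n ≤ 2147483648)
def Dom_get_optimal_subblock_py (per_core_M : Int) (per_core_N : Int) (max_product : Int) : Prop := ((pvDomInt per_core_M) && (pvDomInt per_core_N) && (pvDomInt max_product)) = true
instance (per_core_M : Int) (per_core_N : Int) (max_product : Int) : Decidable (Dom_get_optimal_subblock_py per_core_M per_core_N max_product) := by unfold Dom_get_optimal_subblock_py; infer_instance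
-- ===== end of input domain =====

-- B replaces A's nested O(M*N) sweep by two flat top-down scans over the two valid
-- candidate families ((1,w) with w|N, and (h,N) with h|M), O(M+N): same result, faster.

-- ===== PORT A =====
-- literal transliteration of _get_optimal_subblock (nested loops, running best)
def get_optimal_subblock_py (per_core_M : Int) (per_core_N : Int) (max_product : Int) : List Int :=
  let r :=
    (PySem.List.pyRange 1 (per_core_M + 1) 1).foldl (fun (b : Int × Int) h =>
      if PySem.Int.mod per_core_M h ≠ 0 then b
      else
        (PySem.List.pyRange 1 (per_core_N + 1) 1).foldl (fun (b : Int × Int) w =>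
          if PySem.Int.mod per_core_N w ≠ 0 then b
          else if h * w > max_product then b
          else if ¬ (w == per_core_N || h == 1) then b
          else if h * w > b.1 * b.2 then (h, w) else b) b) (1, 1)
  [r.1, r.2]

-- ===== PORT B =====
-- literal transliteration of Source B: guard, two top-down first-hit scans, compare
def get_optimal_subblock_py_alt (per_core_M : Int) (per_core_N : Int) (max_product : Int) : List Int :=
  if per_core_M < 1 ∨ per_core_N < 1 then [1, 1]
  else
    let w1 := ((PySem.List.pyRange per_core_N 0 (-1)).find?
        (fun w => PySem.Int.mod per_core_N w == 0 && decide (w ≤ max_product))).getD 0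
    let h2 := ((PySem.List.pyRange per_core_M 1 (-1)).find?
        (fun h => PySem.Int.mod per_core_M h == 0 && decide (h * per_core_N ≤ max_product))).getD 0
    if h2 ≠ 0 ∧ h2 * per_core_N > w1 then [h2, per_core_N]
    else if w1 ≠ 0 then [1, w1]
    else [1, 1]

-- ===== PRECONDITION & SPEC =====
def Spec_get_optimal_subblock_py (per_core_M : Int) (per_core_N : Int) (max_product : Int) (out : List Int) : Prop := out = get_optimal_subblock_py_alt per_core_M per_core_N max_product
instance (per_core_M : Int) (per_core_N : Int) (max_product : Int) (out : List Int) : Decidable (Spec_get_optimal_subblock_py per_core_M per_core_N max_product out) := by unfold Spec_get_optimal_subblock_py; infer_instance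

-- ===== CLAIM (what is proved, stated in full; the proofs are below) =====
def Claim_equal_get_optimal_subblock_py : Prop := ∀ (per_core_M : Int) (per_core_N : Int) (max_product : Int), Dom_get_optimal_subblock_py per_core_M per_core_N max_product → Spec_get_optimal_subblock_py per_core_M per_core_N max_product (get_optimal_subblock_py per_core_M per_core_N max_product)

-- ===== LEMMAS AND PROOFS =====

def topFind (p : Int → Bool) (lo : Int) : Nat → Int
  | 0 => 0
  | k + 1 => if p (lo + k + 1) then lo + k + 1 else topFind p lo k

theorem topFind_le (p : Int → Bool) (lo : Int) (k : Nat) :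
    topFind p lo k = 0 ∨ (lo + 1 ≤ topFind p lo k ∧ topFind p lo k ≤ lo + k) := by
  induction k with
  | zero => left; rfl
  | succ k ih =>
    simp only [topFind]
    split
    · right; push_cast; omega
    · rcases ih with h | h
      · left; exact h
      · right; push_cast at h ⊢; omega

theorem find_desc (p : Int → Bool) (lo : Int) (k : Nat) :
    ((PySem.List.pyRange (lo + k) lo (-1)).find? p).getD 0 = topFind p lo k := by
  induction k with
  | zero => rw [PySem.List.pyRange_neg_one_eq_nil (by omega)]; rfl
  | succ k ih =>
    have h1 : lo + ((k + 1 : Nat) : Int) = lo + (k : Int) + 1 := by push_cast; ring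
    rw [h1, PySem.List.pyRange_neg_one_cons (by omega)]
    have h2 : lo + (k : Int) + 1 - 1 = lo + (k : Int) := by ring
    rw [h2]
    simp only [topFind]
    by_cases hp : p (lo + (k : Int) + 1)
    · rw [List.find?_cons_of_pos (p := p) hp, if_pos hp]
      rfl
    · rw [List.find?_cons_of_neg (p := p) (by simp [hp]), if_neg (by simp [hp]), ih]

def pW (N cap w : Int) : Bool := PySem.Int.mod N w == 0 && decide (w ≤ cap)
def pH (M N cap h : Int) : Bool := PySem.Int.mod M h == 0 && decide (h * N ≤ cap)

theorem inner_one (N cap : Int) (k : Nat) :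
    (PySem.List.pyRange 1 ((k : Int) + 1) 1).foldl (fun (b : Int × Int) w =>
        if PySem.Int.mod N w ≠ 0 then b
        else if 1 * w > cap then b
        else if ¬ (w == N || (1 : Int) == 1) then b
        else if 1 * w > b.1 * b.2 then (1, w) else b) (1, 1)
      = (1, max 1 (topFind (pW N cap) 0 k)) := by
  induction k with
  | zero =>
    rw [PySem.List.pyRange_one_eq_nil (by omega)]
    simp [topFind]
  | succ k ih =>
    have hsplit : (((k : Nat) + 1 : Nat) : Int) + 1 = ((k : Int) + 1) + 1 := by push_cast; ring
    rw [hsplit, PySem.List.pyRange_one_succ_right (by omega), List.foldl_append, ih]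
    have hWk : 0 ≤ topFind (pW N cap) 0 k ∧ topFind (pW N cap) 0 k ≤ (k : Int) := by
      rcases topFind_le (pW N cap) 0 k with h | ⟨h1, h2⟩
      · omega
      · omega
    simp only [List.foldl_cons, List.foldl_nil, topFind, pW, zero_add]
    split_ifs <;> simp_all
    omega

theorem inner_ge_two (N cap : Int) (h : Int) (hh : 2 ≤ h) (b : Int × Int)
    (k : Nat) (hk : (k : Int) ≤ N) (hN : 1 ≤ N) :
    (PySem.List.pyRange 1 ((k : Int) + 1) 1).foldl (fun (b : Int × Int) w =>
        if PySem.Int.mod N w ≠ 0 then b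
        else if h * w > cap then b
        else if ¬ (w == N || h == 1) then b
        else if h * w > b.1 * b.2 then (h, w) else b) b
      = if (k : Int) = N ∧ h * N ≤ cap ∧ h * N > b.1 * b.2 then (h, N) else b := by
  induction k with
  | zero =>
    rw [PySem.List.pyRange_one_eq_nil (by omega)]
    rw [if_neg (by push_cast; omega)]
    rfl
  | succ k ih =>
    have hk' : (k : Int) ≤ N := by push_cast at hk; omega
    have hkN : ¬ ((k : Int) = N) := by push_cast at hk; omega
    have hsplit : (((k : Nat) + 1 : Nat) : Int) + 1 = ((k : Int) + 1) + 1 := by push_cast; ring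
    have hc : (((k : Nat) + 1 : Nat) : Int) = (k : Int) + 1 := by push_cast; ring
    rw [hsplit, PySem.List.pyRange_one_succ_right (by omega), List.foldl_append, ih hk',
      if_neg (by tauto), hc]
    simp only [List.foldl_cons, List.foldl_nil]
    by_cases hlast : (k : Int) + 1 = N
    · have hdvd : PySem.Int.mod N ((k : Int) + 1) = 0 := by
        rw [PySem.Int.mod_eq_zero_iff_dvd, hlast]
      rw [if_neg (not_not_intro hdvd)]
      by_cases hcap : h * ((k : Int) + 1) > cap
      · rw [if_pos hcap, if_neg (by rintro ⟨h1, h2, _⟩; rw [← h1] at h2; exact absurd h2 (not_le.mpr hcap))]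
      · rw [if_neg hcap, if_neg (show ¬¬((((k : Int) + 1) == N || h == 1) = true) by simp [hlast])]
        by_cases hbig : h * ((k : Int) + 1) > b.1 * b.2
        · rw [if_pos hbig,
            if_pos ⟨hlast, by rw [← hlast]; exact not_lt.mp hcap, by rw [← hlast]; exact hbig⟩, hlast]
        · rw [if_neg hbig, if_neg (by rintro ⟨h1, _, h3⟩; rw [← h1] at h3; exact hbig h3)]
    · have hR : ¬ (((k : Int) + 1) = N ∧ h * N ≤ cap ∧ h * N > b.1 * b.2) := by
        rintro ⟨h1, _⟩; exact hlast h1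
      by_cases hdvd : PySem.Int.mod N ((k : Int) + 1) = 0
      · rw [if_neg (not_not_intro hdvd)]
        by_cases hcap : h * ((k : Int) + 1) > cap
        · rw [if_pos hcap, if_neg hR]
        · rw [if_neg hcap,
            if_pos (show ¬((((k : Int) + 1) == N || h == 1) = true) by simp [hlast]; omega),
            if_neg hR]
      · rw [if_pos hdvd, if_neg hR]

theorem foldl_fixed {α β : Type} (f : α → β → α) (a : α) (l : List β)
    (h : ∀ x ∈ l, f a x = a) : l.foldl f a = a := by
  induction l with
  | nil => rfl
  | cons x xs ih =>
    rw [List.foldl_cons, h x (List.mem_cons_self), ih]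
    intro y hy; exact h y (List.mem_cons_of_mem _ hy)

theorem outer_loop (M N cap : Int) (hN : 1 ≤ N) (k : Nat) (hk : 1 ≤ k) :
    (PySem.List.pyRange 1 ((k : Int) + 1) 1).foldl (fun (b : Int × Int) h =>
      if PySem.Int.mod M h ≠ 0 then b
      else
        (PySem.List.pyRange 1 (N + 1) 1).foldl (fun (b : Int × Int) w =>
          if PySem.Int.mod N w ≠ 0 then b
          else if h * w > cap then b
          else if ¬ (w == N || h == 1) then b
          else if h * w > b.1 * b.2 then (h, w) else b) b) (1, 1)
      = (if topFind (pH M N cap) 1 (k - 1) * N > max 1 (topFind (pW N cap) 0 N.toNat)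
         then (topFind (pH M N cap) 1 (k - 1), N)
         else (1, max 1 (topFind (pW N cap) 0 N.toNat))) := by
  have hNrw : N + 1 = ((N.toNat : Int)) + 1 := by omega
  have hWb : 0 ≤ topFind (pW N cap) 0 N.toNat ∧ topFind (pW N cap) 0 N.toNat ≤ N := by
    rcases topFind_le (pW N cap) 0 N.toNat with h | ⟨h1, h2⟩
    · omega
    · omega
  have hdvd1 : PySem.Int.mod M 1 = 0 := by
    rw [PySem.Int.mod_eq_zero_iff_dvd]; exact one_dvd _
  induction k with
  | zero => omega
  | succ k ih =>
    by_cases hk0 : k = 0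
    · subst hk0
      rw [show (((0 : Nat) + 1 : Nat) : Int) + 1 = (1 : Int) + 1 from by norm_num,
        PySem.List.pyRange_one_singleton]
      simp only [List.foldl_cons, List.foldl_nil]
      rw [if_neg (not_not_intro hdvd1), hNrw, inner_one N cap N.toNat]
      rw [show (0 + 1 - 1 : Nat) = 0 from rfl]
      simp only [topFind]
      rw [zero_mul, if_neg (by omega)]
    · have hk1 : 1 ≤ k := by omega
      have hsplit : (((k : Nat) + 1 : Nat) : Int) + 1 = ((k : Int) + 1) + 1 := by push_cast; ring
      rw [hsplit, PySem.List.pyRange_one_succ_right (a := 1) (b := (k : Int) + 1) (by omega),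
        List.foldl_append, ih hk1]
      rw [show (k + 1 - 1 : Nat) = (k - 1) + 1 from by omega]
      simp only [topFind]
      have hidx : (1 : Int) + ((k - 1 : Nat) : Int) + 1 = (k : Int) + 1 := by
        push_cast [hk1]
        omega
      rw [hidx]
      set W := max 1 (topFind (pW N cap) 0 N.toNat) with hWdef
      set H := topFind (pH M N cap) 1 (k - 1) with hHdef
      have hHb : H = 0 ∨ (2 ≤ H ∧ H ≤ (k : Int)) := by
        rcases topFind_le (pH M N cap) 1 (k - 1) with h | ⟨h1, h2⟩
        · left; rw [hHdef]; exact h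
        · right; rw [hHdef]; constructor
          · omega
          · omega
      have hWpos : 1 ≤ W := le_max_left _ _
      have hk2 : (2 : Int) ≤ (k : Int) + 1 := by omega
      simp only [List.foldl_cons, List.foldl_nil]
      by_cases hdvd : PySem.Int.mod M ((k : Int) + 1) = 0
      · have hdvd' : ((k : Int) + 1) ∣ M := (PySem.Int.mod_eq_zero_iff_dvd M _).mp hdvd
        rw [if_neg (not_not_intro hdvd), hNrw,
          inner_ge_two N cap ((k : Int) + 1) hk2 _ N.toNat (by omega) hN]
        by_cases hcap : ((k : Int) + 1) * N ≤ cap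
        · have hpH : pH M N cap ((k : Int) + 1) = true := by simp [pH, hdvd', hcap]
          rw [if_pos hpH]
          have hHN : H * N < ((k : Int) + 1) * N := by
            have hHlt : H < (k : Int) + 1 := by rcases hHb with h | ⟨_, h2⟩ <;> omega
            exact mul_lt_mul_of_pos_right hHlt (by omega)
          by_cases hHW : H * N > W
          · rw [if_pos hHW]
            rw [show ((H, N) : Int × Int).1 * ((H, N) : Int × Int).2 = H * N from rfl]
            rw [if_pos ⟨by omega, hcap, hHN⟩, if_pos (by linarith [hHN, hHW])]
          · rw [if_neg hHW]
            rw [show ((1, W) : Int × Int).1 * ((1, W) : Int × Int).2 = W from by simp]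
            by_cases hks : ((k : Int) + 1) * N > W
            · rw [if_pos ⟨by omega, hcap, hks⟩, if_pos hks]
            · rw [if_neg (by rintro ⟨_, _, h3⟩; exact hks h3), if_neg hks]
        · have hpH : pH M N cap ((k : Int) + 1) = false := by
            simp only [pH, Bool.and_eq_false_iff]; right; simpa using hcap
          rw [if_neg (show ¬ pH M N cap ((k : Int) + 1) = true by simp [hpH])]
          rw [if_neg (by rintro ⟨_, h2, _⟩; exact hcap h2)]
      · have hpH : pH M N cap ((k : Int) + 1) = false := by
          simp only [pH, Bool.and_eq_false_iff]; left; simpa using hdvd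
        rw [if_pos hdvd, if_neg (show ¬ pH M N cap ((k : Int) + 1) = true by simp [hpH])]

-- ===== VERDICT (by name: the statement is the Claim_ definition above) =====
theorem get_optimal_subblock_py_spec : Claim_equal_get_optimal_subblock_py := by
  intro M N cap _
  unfold Spec_get_optimal_subblock_py get_optimal_subblock_py get_optimal_subblock_py_alt
  by_cases hM : M < 1
  · rw [if_pos (Or.inl hM), PySem.List.pyRange_one_eq_nil (a := 1) (b := M + 1) (by omega)]
    rfl
  · by_cases hN : N < 1
    · rw [if_pos (Or.inr hN)]
      have hfix : ∀ x ∈ PySem.List.pyRange 1 (M + 1) 1,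
          (fun (b : Int × Int) h =>
            if PySem.Int.mod M h ≠ 0 then b
            else (PySem.List.pyRange 1 (N + 1) 1).foldl (fun (b : Int × Int) w =>
                if PySem.Int.mod N w ≠ 0 then b
                else if h * w > cap then b
                else if ¬ (w == N || h == 1) then b
                else if h * w > b.1 * b.2 then (h, w) else b) b) ((1, 1) : Int × Int) x = (1, 1) := by
        intro x _
        simp only
        rw [PySem.List.pyRange_one_eq_nil (a := 1) (b := N + 1) (by omega)]
        split <;> rfl
      rw [foldl_fixed _ _ _ hfix]
    · rw [if_neg (by omega)]
      replace hM : 1 ≤ M := by omega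
      replace hN : 1 ≤ N := by omega
      have hMrw : M + 1 = ((M.toNat : Int)) + 1 := by omega
      rw [hMrw, outer_loop M N cap hN M.toNat (by omega)]
      have hw1 : ((PySem.List.pyRange N 0 (-1)).find?
            (fun w => PySem.Int.mod N w == 0 && decide (w ≤ cap))).getD 0
          = topFind (pW N cap) 0 N.toNat := by
        rw [show PySem.List.pyRange N 0 (-1)
              = PySem.List.pyRange (0 + ((N.toNat : Nat) : Int)) 0 (-1) from by
            rw [show (0 : Int) + ((N.toNat : Nat) : Int) = N from by omega], find_desc]
        rfl
      have hh2 : ((PySem.List.pyRange M 1 (-1)).find?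
            (fun h => PySem.Int.mod M h == 0 && decide (h * N ≤ cap))).getD 0
          = topFind (pH M N cap) 1 (M.toNat - 1) := by
        rw [show PySem.List.pyRange M 1 (-1)
              = PySem.List.pyRange (1 + ((M.toNat - 1 : Nat) : Int)) 1 (-1) from by
            rw [show (1 : Int) + ((M.toNat - 1 : Nat) : Int) = M from by omega], find_desc]
        rfl
      rw [hw1, hh2]
      set W := topFind (pW N cap) 0 N.toNat with hWdef
      set H := topFind (pH M N cap) 1 (M.toNat - 1) with hHdef
      have hbW : W = 0 ∨ (1 ≤ W ∧ W ≤ N) := by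
        rcases topFind_le (pW N cap) 0 N.toNat with h | ⟨h1, h2⟩
        · left; exact h
        · right; omega
      have hbH : H = 0 ∨ 2 ≤ H := by
        rcases topFind_le (pH M N cap) 1 (M.toNat - 1) with h | ⟨h1, _⟩
        · left; exact h
        · right; omega
      rcases hbH with hH0 | hH2
      · rw [hH0, zero_mul, if_neg (by omega), if_neg (by simp)]
        rcases hbW with hW0 | ⟨hW1, _⟩
        · rw [hW0, if_neg (by omega)]
          norm_num
        · rw [if_pos (by omega)]
          rw [show max 1 W = W from by omega]
      · have h2N : 2 * N ≤ H * N := mul_le_mul_of_nonneg_right hH2 (by omega)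
        by_cases hc : H * N > W
        · rw [if_pos (by rcases hbW with h | ⟨h1, _⟩ <;> omega), if_pos ⟨by omega, hc⟩]
        · have hW2 : 2 ≤ W := by rcases hbW with h | ⟨h1, _⟩ <;> omega
          rw [if_neg (by omega), if_neg (by omega), if_pos (by omega),
            show max 1 W = W from by omega]
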